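-- pv_equiv track=rewrite | github.com/asatpathy314/open-introspection | logit-shift-eval/run_sweep.py | is_text_like_token_text
-- ===== SOURCE A (Python) =====
-- def normalize_token_text(text: str) -> str:
--     """Lowercase token text with only ASCII letters retained."""
--     return "".join(ch for ch in text.lower() if "a" <= ch <= "z")
--
-- def is_text_like_token_text(text: str, min_alpha_chars: int = 3) -> bool:
--     """Heuristic filter for plain lexical tokens in the tokenizer vocab."""
--     stripped = text.lstrip()
--     if not stripped:
--         return False
--     if "�" in stripped:
--         return False
--     if any(ord(ch) < 32 or ord(ch) > 126 for ch in stripped):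
--         return False
--     if any(ch.isdigit() for ch in stripped):
--         return False
--     allowed = set("abcdefghijklmnopqrstuvwxyzABCDEFGHIJKLMNOPQRSTUVWXYZ -'")
--     if any(ch not in allowed for ch in stripped):
--         return False
--     if not (stripped == stripped.lower() or stripped == stripped.title()):
--         return False
--     return len(normalize_token_text(stripped)) >= min_alpha_chars
-- ===== SOURCE B (Python) =====
-- def is_text_like_token_text(text: str, min_alpha_chars: int = 3) -> bool:
--     """Single-pass filter: one traversal tracks allowed-ness, letter count and case pattern."""
--     stripped = text.lstrip()
--     if not stripped:
--         return False
--     alpha = 0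
--     all_lower = True
--     title_ok = True
--     prev_alpha = False
--     for ch in stripped:
--         is_up = 'A' <= ch <= 'Z'
--         is_lo = 'a' <= ch <= 'z'
--         if not (is_up or is_lo or ch == ' ' or ch == '-' or ch == "'"):
--             return False
--         if is_up or is_lo:
--             alpha += 1
--             if is_up:
--                 all_lower = False
--                 if prev_alpha:
--                     title_ok = False
--             elif not prev_alpha:
--                 title_ok = False
--             prev_alpha = True
--         else:
--             prev_alpha = False
--     if not (all_lower or title_ok):
--         return False
--     return alpha >= min_alpha_chars
-- ===== Notes on version B (the rewrite author's own statement) =====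
-- stated objective: faster
-- what changed: A makes several whole-string passes (three any(...) guards, a set-membership scan, building lowercased and titlecased copies to compare, and a normalize-then-count pass); B makes a single left-to-right pass over the stripped text carrying a letter counter, an all-lowercase flag, a title-pattern flag and a previous-char-is-letter flag, with an early False on the first disallowed character.
import Mathlib
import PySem

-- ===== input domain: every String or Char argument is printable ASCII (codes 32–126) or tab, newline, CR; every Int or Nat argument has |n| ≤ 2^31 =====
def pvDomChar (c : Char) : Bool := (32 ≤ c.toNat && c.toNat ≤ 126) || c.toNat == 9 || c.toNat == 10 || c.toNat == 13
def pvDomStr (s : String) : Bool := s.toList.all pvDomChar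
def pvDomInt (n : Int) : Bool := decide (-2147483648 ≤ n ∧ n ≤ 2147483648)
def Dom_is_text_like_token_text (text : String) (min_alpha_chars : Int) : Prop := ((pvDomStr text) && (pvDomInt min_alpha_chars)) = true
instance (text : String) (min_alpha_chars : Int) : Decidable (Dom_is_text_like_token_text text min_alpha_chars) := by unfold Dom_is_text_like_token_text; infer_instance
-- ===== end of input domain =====

-- B replaces A's five separate whole-string scans (three any(...) guards, the
-- lower/title comparison data, the normalize-and-count pass) by one left-to-right
-- scan carrying (letter count, all-lower flag, title-pattern flag, prev-is-letter).

-- ===== PORT A =====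
-- the characters of the Python set literal, in order
def pvAllowedList : List Char :=
  ['a', 'b', 'c', 'd', 'e', 'f', 'g', 'h', 'i', 'j', 'k', 'l', 'm', 'n', 'o', 'p', 'q', 'r', 's', 't', 'u', 'v', 'w', 'x', 'y', 'z', 'A', 'B', 'C', 'D', 'E', 'F', 'G', 'H', 'I', 'J', 'K', 'L', 'M', 'N', 'O', 'P', 'Q', 'R', 'S', 'T', 'U', 'V', 'W', 'X', 'Y', 'Z', ' ', '-', '\'']

def pvAllowedSet : PySem.Set Char := PySem.Set.ofList pvAllowedList

-- helper normalize_token_text, on the character list of its str argument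
def normalize_token_text (cs : List Char) : List Char :=
  (PySem.Chars.lower cs).filter (fun ch => decide ('a' ≤ ch) && decide (ch ≤ 'z'))

-- str.title(): hand port (PySem has none); exact on ASCII, where Python's
-- "cased character" is exactly an ASCII letter (= PySem.Chars.isalpha on this domain)
def pyTitle : List Char → Bool → List Char
  | [], _ => []
  | c :: t, prev =>
    (if PySem.Chars.isalpha c then
       (if prev then PySem.Chars.lowerChar c else PySem.Chars.upperChar c)
     else c) :: pyTitle t (PySem.Chars.isalpha c)

-- the body of A from `stripped` on (A's code verbatim, over the char list of stripped)
def pvABody (stripped : List Char) (min_alpha_chars : Int) : Bool :=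
  if stripped.isEmpty then false
  else if PySem.Chars.isIn [Char.ofNat 65533] stripped then false   -- "\u{FFFD}" in stripped
  else if stripped.any (fun ch => decide (ch.toNat < 32) || decide (ch.toNat > 126)) then false
  else if stripped.any (fun ch => PySem.Chars.isdigit ch) then false
  else if stripped.any (fun ch => !(PySem.Set.contains pvAllowedSet ch)) then false
  else if !((stripped == PySem.Chars.lower stripped) || (stripped == pyTitle stripped false)) then false
  else decide (((normalize_token_text stripped).length : Int) ≥ min_alpha_chars)

def is_text_like_token_text (text : String) (min_alpha_chars : Int) : Bool :=
  pvABody ((PySem.Str.lstrip text).toList) min_alpha_chars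

-- ===== PORT B =====
-- the for-loop of Source B: state (alpha, all_lower, title_ok, prev_alpha); none = early `return False`
def pvScan : List Char → Int → Bool → Bool → Bool → Option (Int × Bool × Bool × Bool)
  | [], alpha, all_lower, title_ok, prev_alpha => some (alpha, all_lower, title_ok, prev_alpha)
  | ch :: t, alpha, all_lower, title_ok, prev_alpha =>
    let is_up := decide ('A' ≤ ch) && decide (ch ≤ 'Z')
    let is_lo := decide ('a' ≤ ch) && decide (ch ≤ 'z')
    if !(is_up || is_lo || ch == ' ' || ch == '-' || ch == '\'') then none
    else if is_up || is_lo then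
      pvScan t (alpha + 1) (if is_up then false else all_lower)
        (if is_up then (if prev_alpha then false else title_ok)
         else (if !prev_alpha then false else title_ok)) true
    else pvScan t alpha all_lower title_ok false

-- the body of B from `stripped` on
def pvBBody (stripped : List Char) (min_alpha_chars : Int) : Bool :=
  if stripped.isEmpty then false
  else
    match pvScan stripped 0 true true false with
    | none => false
    | some (alpha, all_lower, title_ok, _) =>
      if !(all_lower || title_ok) then false
      else decide (alpha ≥ min_alpha_chars)

def is_text_like_token_text_alt (text : String) (min_alpha_chars : Int) : Bool :=
  pvBBody ((PySem.Str.lstrip text).toList) min_alpha_chars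

-- ===== PRECONDITION & SPEC =====
def Spec_is_text_like_token_text (text : String) (min_alpha_chars : Int) (out : Bool) : Prop := out = is_text_like_token_text_alt text min_alpha_chars
instance (text : String) (min_alpha_chars : Int) (out : Bool) : Decidable (Spec_is_text_like_token_text text min_alpha_chars out) := by unfold Spec_is_text_like_token_text; infer_instance

-- ===== CLAIM (what is proved, stated in full; the proofs are below) =====
def Claim_equal_is_text_like_token_text : Prop := ∀ (text : String) (min_alpha_chars : Int), Dom_is_text_like_token_text text min_alpha_chars → Spec_is_text_like_token_text text min_alpha_chars (is_text_like_token_text text min_alpha_chars)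

-- ===== LEMMAS AND PROOFS =====

-- per-character classifiers matching Source B's tests
def pvIsUp (c : Char) : Bool := decide ('A' ≤ c) && decide (c ≤ 'Z')
def pvIsLo (c : Char) : Bool := decide ('a' ≤ c) && decide (c ≤ 'z')
def pvOkC (c : Char) : Bool := pvIsUp c || pvIsLo c || c == ' ' || c == '-' || c == '\''

-- "the string equals its own title()" as a per-character pattern
def pvTitleOK : Bool → List Char → Bool
  | _, [] => true
  | p, c :: t =>
    (if pvIsUp c then !p else if pvIsLo c then p else true) && pvTitleOK (pvIsUp c || pvIsLo c) t

-- the prev_alpha flag after scanning a list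
def pvPrevA : Bool → List Char → Bool
  | p, [] => p
  | _, c :: t => pvPrevA (pvIsUp c || pvIsLo c) t

lemma pvLe (c d : Char) : c ≤ d ↔ c.toNat ≤ d.toNat := by
  rw [Char.le_def, UInt32.le_iff_toNat_le]; rfl

lemma pvUp_iff (c : Char) : pvIsUp c = true ↔ 65 ≤ c.toNat ∧ c.toNat ≤ 90 := by
  have h1 := pvLe 'A' c; have h2 := pvLe c 'Z'
  simp [pvIsUp, h1, h2]

lemma pvLo_iff (c : Char) : pvIsLo c = true ↔ 97 ≤ c.toNat ∧ c.toNat ≤ 122 := by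
  have h1 := pvLe 'a' c; have h2 := pvLe c 'z'
  simp [pvIsLo, h1, h2]

lemma pvMemUp (c : Char) (h1 : 65 ≤ c.toNat) (h2 : c.toNat ≤ 90) : c ∈ pvAllowedList := by
  rw [← Char.ofNat_toNat c]
  set n := c.toNat with hn
  clear_value n
  clear hn
  interval_cases n <;> decide

lemma pvMemLo (c : Char) (h1 : 97 ≤ c.toNat) (h2 : c.toNat ≤ 122) : c ∈ pvAllowedList := by
  rw [← Char.ofNat_toNat c]
  set n := c.toNat with hn
  clear_value n
  clear hn
  interval_cases n <;> decide

lemma pvToNat_ofNat (m : Nat) (h : m < 55296) : (Char.ofNat m).toNat = m := by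
  rw [Char.toNat_ofNat, if_pos (Or.inl h)]

lemma pvCharFacts (c : Char) (h : pvOkC c = true) :
    ((decide (c.toNat < 32) || decide (c.toNat > 126)) = false)
    ∧ (PySem.Chars.isdigit c = false)
    ∧ (c ∈ pvAllowedList)
    ∧ ((PySem.Chars.lowerChar c = c) ↔ pvIsUp c = false)
    ∧ (pvIsUp c = true → PySem.Chars.upperChar c = c)
    ∧ (pvIsUp c = false → pvIsLo c = true → PySem.Chars.upperChar c ≠ c)
    ∧ ((decide ('a' ≤ PySem.Chars.lowerChar c) && decide (PySem.Chars.lowerChar c ≤ 'z'))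
        = (pvIsUp c || pvIsLo c)) := by
  have d0 : ('0').toNat = 48 := rfl
  have d9 : ('9').toNat = 57 := rfl
  have da : ('a').toNat = 97 := rfl
  have dz : ('z').toNat = 122 := rfl
  by_cases hu : pvIsUp c = true
  · -- uppercase letter
    obtain ⟨hn1, hn2⟩ := (pvUp_iff c).mp hu
    have hlow : PySem.Chars.lowerChar c = Char.ofNat (c.toNat + 32) := by
      simp only [PySem.Chars.lowerChar]
      rw [if_pos (show PySem.Chars.isupper c = true from hu)]
    have hlto : (PySem.Chars.lowerChar c).toNat = c.toNat + 32 := by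
      rw [hlow, pvToNat_ofNat _ (by omega)]
    have hlof : pvIsLo c = false := by
      rw [← Bool.not_eq_true, pvLo_iff]; omega
    refine ⟨?_, ?_, pvMemUp c hn1 hn2, ?_, ?_, ?_, ?_⟩
    · simp only [Bool.or_eq_false_iff, decide_eq_false_iff_not]; omega
    · simp only [PySem.Chars.isdigit, Bool.and_eq_false_iff, decide_eq_false_iff_not, pvLe, d0, d9]
      omega
    · simp only [hu]
      constructor
      · intro heq
        have := congrArg Char.toNat heq
        rw [hlto] at this; omega
      · intro hf; cases hf
    · intro _
      simp [PySem.Chars.upperChar, show PySem.Chars.islower c = pvIsLo c from rfl, hlof]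
    · intro hupf _; rw [hu] at hupf; cases hupf
    · simp only [hu, Bool.true_or, Bool.and_eq_true, decide_eq_true_eq, pvLe, hlto, da, dz]
      omega
  · have hu' : pvIsUp c = false := Bool.eq_false_iff.mpr hu
    by_cases hl0 : pvIsLo c = true
    · -- lowercase letter
      obtain ⟨hn1, hn2⟩ := (pvLo_iff c).mp hl0
      have hlow : PySem.Chars.lowerChar c = c := by
        simp only [PySem.Chars.lowerChar]
        rw [if_neg]
        rw [show PySem.Chars.isupper c = pvIsUp c from rfl, hu']; simp
      have hup2 : PySem.Chars.upperChar c = Char.ofNat (c.toNat - 32) := by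
        simp only [PySem.Chars.upperChar]
        rw [if_pos (show PySem.Chars.islower c = true from hl0)]
      have hupto : (PySem.Chars.upperChar c).toNat = c.toNat - 32 := by
        rw [hup2, pvToNat_ofNat _ (by omega)]
      refine ⟨?_, ?_, pvMemLo c hn1 hn2, ?_, ?_, ?_, ?_⟩
      · simp only [Bool.or_eq_false_iff, decide_eq_false_iff_not]; omega
      · simp only [PySem.Chars.isdigit, Bool.and_eq_false_iff, decide_eq_false_iff_not, pvLe, d0, d9]
        omega
      · simp [hlow, hu']
      · intro hut; rw [hu'] at hut; cases hut
      · intro _ _ heq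
        have := congrArg Char.toNat heq
        rw [hupto] at this; omega
      · rw [hlow]
        simp only [hu', hl0, Bool.false_or, Bool.and_eq_true, decide_eq_true_eq, pvLe, da, dz]
        omega
    · -- one of the three punctuation characters
      have hl0' : pvIsLo c = false := Bool.eq_false_iff.mpr hl0
      rw [pvOkC, hu', hl0', Bool.false_or, Bool.false_or] at h
      by_cases hsp : c = ' '
      · subst hsp; refine ⟨?_, ?_, ?_, ?_, ?_, ?_, ?_⟩ <;> decide
      · by_cases hhy : c = '-'
        · subst hhy; refine ⟨?_, ?_, ?_, ?_, ?_, ?_, ?_⟩ <;> decide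
        · have hap : c = '\'' := by
            have d1 : (c == ' ') = false := beq_eq_false_iff_ne.mpr hsp
            have d2 : (c == '-') = false := beq_eq_false_iff_ne.mpr hhy
            rw [d1, d2, Bool.false_or, Bool.false_or] at h
            exact eq_of_beq h
          subst hap; refine ⟨?_, ?_, ?_, ?_, ?_, ?_, ?_⟩ <;> decide

lemma pvIsalpha_eq (c : Char) : PySem.Chars.isalpha c = (pvIsUp c || pvIsLo c) := rfl

lemma pvAllOk : ∀ x ∈ pvAllowedList, pvOkC x = true := by
  have hb : pvAllowedList.all pvOkC = true := by decide
  intro x hx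
  exact List.all_eq_true.mp hb x hx

lemma pvContains (c : Char) : PySem.Set.contains pvAllowedSet c = pvOkC c := by
  cases hok : pvOkC c
  · rw [← Bool.not_eq_true, PySem.Set.contains_iff]
    intro hmem
    rw [pvAllOk c ((PySem.Set.mem_ofList pvAllowedList c).mp hmem)] at hok
    cases hok
  · rw [PySem.Set.contains_iff]
    exact (PySem.Set.mem_ofList pvAllowedList c).mpr (pvCharFacts c hok).2.2.1

lemma pvScan_cons (c : Char) (t : List Char) (a : Int) (x y p : Bool) :
    pvScan (c :: t) a x y p =
      if !(pvOkC c) then none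
      else if (pvIsUp c || pvIsLo c) then
        pvScan t (a + 1) (if pvIsUp c then false else x)
          (if pvIsUp c then (if p then false else y) else (if !p then false else y)) true
      else pvScan t a x y false := rfl

lemma pvScan_none (l : List Char) (hl : ∃ c ∈ l, pvOkC c = false) :
    ∀ a x y p, pvScan l a x y p = none := by
  induction l with
  | nil => obtain ⟨c, hc, hcf⟩ := hl; cases hc
  | cons c t ih =>
    intro a x y p
    obtain ⟨d, hd, hdf⟩ := hl
    rw [pvScan_cons]
    cases hcv : pvOkC c
    · rw [if_pos (by simp)]
    · have hdt : d ∈ t := by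
        rcases List.mem_cons.mp hd with rfl | hmem
        · rw [hcv] at hdf; cases hdf
        · exact hmem
      rw [if_neg (by simp)]
      split
      · exact ih ⟨d, hdt, hdf⟩ _ _ _ _
      · exact ih ⟨d, hdt, hdf⟩ _ _ _ _

lemma pvScan_some (l : List Char) (hl : ∀ c ∈ l, pvOkC c = true) :
    ∀ a x y p, pvScan l a x y p =
      some (a + (l.countP (fun c => pvIsUp c || pvIsLo c) : Int),
            x && l.all (fun c => !pvIsUp c),
            y && pvTitleOK p l,
            pvPrevA p l) := by
  induction l with
  | nil => intro a x y p; simp [pvScan, pvTitleOK, pvPrevA]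
  | cons c t ih =>
    intro a x y p
    have hc : pvOkC c = true := hl c List.mem_cons_self
    have ht : ∀ c ∈ t, pvOkC c = true := fun d hd => hl d (List.mem_cons_of_mem _ hd)
    rw [pvScan_cons, if_neg (by simp [hc])]
    cases hletter : (pvIsUp c || pvIsLo c) with
    | true =>
      rw [if_pos rfl, ih ht]
      simp only [Option.some.injEq, Prod.mk.injEq]
      refine ⟨?_, ?_, ?_, ?_⟩
      · rw [List.countP_cons, hletter, if_pos rfl]
        push_cast; ring
      · rw [List.all_cons]
        cases pvIsUp c <;> cases x <;> simp
      · rw [pvTitleOK, hletter]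
        cases hup : pvIsUp c
        · have hlo : pvIsLo c = true := by rw [hup, Bool.false_or] at hletter; exact hletter
          cases p <;> cases y <;> simp [hlo]
        · cases p <;> cases y <;> simp
      · rw [pvPrevA, hletter]
    | false =>
      rw [if_neg (by simp : ¬ (false = true)), ih ht]
      obtain ⟨hup, hlo⟩ := Bool.or_eq_false_iff.mp hletter
      simp only [Option.some.injEq, Prod.mk.injEq]
      refine ⟨?_, ?_, ?_, ?_⟩
      · rw [List.countP_cons, hletter]; simp
      · rw [List.all_cons, hup]; simp
      · rw [pvTitleOK, hletter, hup, hlo]; simp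
      · rw [pvPrevA, hletter]

lemma pvLower_iff (l : List Char) (hl : ∀ c ∈ l, pvOkC c = true) :
    (l = PySem.Chars.lower l) ↔ l.all (fun c => !pvIsUp c) = true := by
  induction l with
  | nil => simp [PySem.Chars.lower]
  | cons c t ih =>
    have hc := pvCharFacts c (hl c List.mem_cons_self)
    have ht : ∀ c ∈ t, pvOkC c = true := fun d hd => hl d (List.mem_cons_of_mem _ hd)
    simp only [PySem.Chars.lower, List.map_cons, List.cons.injEq, List.all_cons,
      Bool.and_eq_true, Bool.not_eq_eq_eq_not, Bool.not_true]
    rw [show (List.map PySem.Chars.lowerChar t) = PySem.Chars.lower t from rfl]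
    constructor
    · rintro ⟨h1, h2⟩
      exact ⟨hc.2.2.2.1.mp h1.symm, ((ih ht).mp h2 : _)⟩
    · rintro ⟨h1, h2⟩
      exact ⟨(hc.2.2.2.1.mpr h1).symm, (ih ht).mpr h2⟩

lemma pvTitle_iff (l : List Char) (hl : ∀ c ∈ l, pvOkC c = true) :
    ∀ p, (l = pyTitle l p) ↔ pvTitleOK p l = true := by
  induction l with
  | nil => intro p; simp [pyTitle, pvTitleOK]
  | cons c t ih =>
    intro p
    have hcf := pvCharFacts c (hl c List.mem_cons_self)
    have ht : ∀ c ∈ t, pvOkC c = true := fun d hd => hl d (List.mem_cons_of_mem _ hd)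
    rw [pyTitle, pvTitleOK, pvIsalpha_eq]
    cases hup : pvIsUp c
    · cases hlo : pvIsLo c
      · -- not a letter
        simp only [Bool.or_self, Bool.false_eq_true, if_false, List.cons.injEq,
          Bool.true_and, true_and]
        exact ih ht false
      · -- lowercase letter
        simp only [Bool.false_or, if_true, List.cons.injEq]
        cases p
        · -- word start, lowercase: title would uppercase it
          simp only [Bool.not_false, Bool.false_eq_true, if_false, Bool.false_and]
          constructor
          · rintro ⟨h1, _⟩
            exact absurd h1.symm (hcf.2.2.2.2.2.1 hup hlo)
          · intro hf; cases hf
        · -- inside a word, lowercase: stays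
          simp only [Bool.not_true, Bool.false_eq_true, if_false, if_true, Bool.true_and]
          constructor
          · rintro ⟨_, h2⟩; exact (ih ht true).mp h2
          · intro h2; exact ⟨(hcf.2.2.2.1.mpr hup).symm, (ih ht true).mpr h2⟩
    · -- uppercase letter
      simp only [Bool.true_or, if_true, List.cons.injEq]
      cases p
      · -- word start, uppercase: stays
        simp only [Bool.false_eq_true, if_false, Bool.not_false, Bool.true_and]
        constructor
        · rintro ⟨_, h2⟩; exact (ih ht true).mp h2
        · intro h2; exact ⟨(hcf.2.2.2.2.1 hup).symm, (ih ht true).mpr h2⟩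
      · -- inside a word, uppercase: title would lowercase it
        simp only [if_true, Bool.not_true, Bool.false_and, Bool.false_eq_true]
        constructor
        · rintro ⟨h1, _⟩
          have := hcf.2.2.2.1.mp h1.symm
          rw [hup] at this; cases this
        · intro hf; cases hf

lemma pvCount_eq (l : List Char) (hl : ∀ c ∈ l, pvOkC c = true) :
    (normalize_token_text l).length = l.countP (fun c => pvIsUp c || pvIsLo c) := by
  unfold normalize_token_text
  rw [← List.countP_eq_length_filter, PySem.Chars.lower, List.countP_map]
  apply List.countP_congr
  intro c hc
  exact iff_of_eq (congrArg (· = true) ((pvCharFacts c (hl c hc)).2.2.2.2.2.2))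

lemma pvMain (l : List Char) (min_alpha_chars : Int) :
    pvABody l min_alpha_chars = pvBBody l min_alpha_chars := by
  unfold pvABody pvBBody
  by_cases hemp : l.isEmpty
  · simp [hemp]
  · have hemp' : l.isEmpty = false := Bool.eq_false_iff.mpr hemp
    by_cases hall : ∀ c ∈ l, pvOkC c = true
    · have h1 : PySem.Chars.isIn [Char.ofNat 65533] l = false := by
        rw [PySem.Chars.isIn_eq_false_iff]
        intro hinf
        have hmem : Char.ofNat 65533 ∈ l := hinf.subset (List.mem_singleton_self _)
        exact absurd (hall _ hmem) (by decide)
      have h2 : l.any (fun ch => decide (ch.toNat < 32) || decide (ch.toNat > 126)) = false := by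
        rw [List.any_eq_false]
        intro c hc
        rw [(pvCharFacts c (hall c hc)).1]
        simp
      have h3 : l.any (fun ch => PySem.Chars.isdigit ch) = false := by
        rw [List.any_eq_false]
        intro c hc
        rw [(pvCharFacts c (hall c hc)).2.1]
        simp
      have h4 : l.any (fun ch => !(PySem.Set.contains pvAllowedSet ch)) = false := by
        rw [List.any_eq_false]
        intro c hc
        rw [pvContains, hall c hc]
        simp
      have e1 : (l == PySem.Chars.lower l) = l.all (fun c => !pvIsUp c) := by
        cases hb : l.all (fun c => !pvIsUp c)
        · rw [beq_eq_false_iff_ne]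
          intro hcontra
          rw [(pvLower_iff l hall).mp hcontra] at hb; cases hb
        · rw [beq_iff_eq]
          exact (pvLower_iff l hall).mpr hb
      have e2 : (l == pyTitle l false) = pvTitleOK false l := by
        cases hb : pvTitleOK false l
        · rw [beq_eq_false_iff_ne]
          intro hcontra
          rw [(pvTitle_iff l hall false).mp hcontra] at hb; cases hb
        · rw [beq_iff_eq]
          exact (pvTitle_iff l hall false).mpr hb
      rw [pvScan_some l hall]
      simp only [hemp', h1, h2, h3, h4, e1, e2, Bool.false_eq_true, if_false,
        Bool.true_and, pvCount_eq l hall, zero_add]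
    · have hex : ∃ c ∈ l, pvOkC c = false := by
        by_contra hno
        apply hall
        intro c hc
        cases hcv : pvOkC c
        · exact absurd ⟨c, hc, hcv⟩ hno
        · rfl
      obtain ⟨c, hc, hcf'⟩ := hex
      rw [pvScan_none l ⟨c, hc, hcf'⟩]
      simp only [hemp', Bool.false_eq_true, if_false]
      split_ifs with g1 g2 g3 g4 g5 <;> try rfl
      exfalso
      apply g4
      rw [List.any_eq_true]
      exact ⟨c, hc, by rw [pvContains, hcf']; rfl⟩

-- ===== VERDICT (by name: the statement is the Claim_ definition above) =====
theorem is_text_like_token_text_spec : Claim_equal_is_text_like_token_text := by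
  intro text min_alpha_chars _
  unfold Spec_is_text_like_token_text is_text_like_token_text is_text_like_token_text_alt
  exact pvMain _ _
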